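-- pv_equiv track=rewrite | github.com/YangXiaoo/Lookoop | AlgorithmsPractice/algorithmsPractice-3.py | maxPurchase
-- ===== SOURCE A (Python) =====
-- def maxPurchase(p):
--     officeInfo = {}
--     for v in p:
--         officeInfo[v] = officeInfo.get(v, 0) + 1
--
--     needInfo = [v for (k, v) in officeInfo.items()]
--     needInfo = sorted(needInfo, reverse=True)
--
--     if len(needInfo) < 3:
--         return sum(needInfo)
--     else:
--         return sum(needInfo[:3])
-- ===== SOURCE B (Python) =====
-- def maxPurchase(p):
--     counts = {}
--     for v in p:
--         counts[v] = counts.get(v, 0) + 1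
--     a = b = c = 0
--     for n in counts.values():
--         if n > a:
--             a, b, c = n, a, b
--         elif n > b:
--             b, c = n, b
--         elif n > c:
--             c = n
--     return a + b + c
-- ===== Notes on version B (the rewrite author's own statement) =====
-- stated objective: alternative
-- what changed: Replaces sorting the frequency counts and slicing the top three with a single linear pass that tracks the three largest counts in three running variables.
import Mathlib
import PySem

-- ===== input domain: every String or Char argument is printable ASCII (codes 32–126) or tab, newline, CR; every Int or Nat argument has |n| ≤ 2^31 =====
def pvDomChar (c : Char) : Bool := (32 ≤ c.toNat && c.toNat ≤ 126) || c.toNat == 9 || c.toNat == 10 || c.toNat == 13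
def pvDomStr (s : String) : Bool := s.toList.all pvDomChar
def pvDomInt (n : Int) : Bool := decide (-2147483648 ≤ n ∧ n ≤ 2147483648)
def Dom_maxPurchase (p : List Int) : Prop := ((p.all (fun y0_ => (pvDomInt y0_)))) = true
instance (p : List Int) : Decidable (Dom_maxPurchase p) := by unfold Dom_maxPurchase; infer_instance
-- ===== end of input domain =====

-- B replaces A's sort-and-slice of the frequency counts by a single linear scan tracking the three largest counts.


-- ===== PORT A =====
def maxPurchase (p : List Int) : Int :=
  let officeInfo := p.foldl (fun d v => d.insert v (d.getD v 0 + 1)) (PySem.Dict.empty : PySem.Dict Int Int)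
  let needInfo := officeInfo.items.map (fun kv => kv.2)
  let needInfo2 := PySem.List.sorted needInfo (fun x => x) true
  if needInfo2.length < 3 then needInfo2.sum
  else (needInfo2.take 3).sum   -- needInfo[:3] (take 3 is exact for the slice [:3])

-- ===== PORT B =====
-- one step of B's top-three tracker ('if n > a: … elif n > b: … elif n > c: …')
def step3 (s : Int × Int × Int) (n : Int) : Int × Int × Int :=
  if s.1 < n then (n, s.1, s.2.1)
  else if s.2.1 < n then (s.1, n, s.2.1)
  else if s.2.2 < n then (s.1, s.2.1, n)
  else s

def maxPurchase_alt (p : List Int) : Int :=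
  let counts := p.foldl (fun d v => d.insert v (d.getD v 0 + 1)) (PySem.Dict.empty : PySem.Dict Int Int)
  let f := counts.values.foldl step3 (0, 0, 0)
  f.1 + f.2.1 + f.2.2

-- ===== PRECONDITION & SPEC =====
def Spec_maxPurchase (p : List Int) (out : Int) : Prop := out = maxPurchase_alt p
instance (p : List Int) (out : Int) : Decidable (Spec_maxPurchase p out) := by unfold Spec_maxPurchase; infer_instance

-- ===== CLAIM (what is proved, stated in full; the proofs are below) =====
def Claim_equal_maxPurchase : Prop := ∀ (p : List Int), Dom_maxPurchase p → Spec_maxPurchase p (maxPurchase p)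

-- ===== LEMMAS AND PROOFS =====

-- Python's sorted(xs, reverse=True) on ints is the unique ≥-ordered permutation of xs.
theorem sRev_char (xs ys : List Int) (hp : ys.Perm xs)
    (hs : ys.Pairwise (fun a b => b ≤ a)) :
    PySem.List.sorted xs (fun x => x) true = ys := by
  apply PySem.List.eq_of_perm_of_pairwise_le_of_injective (key := fun x : Int => -x)
  · exact fun a b h => by simpa using h
  · exact (PySem.List.sorted_perm xs (fun x => x) true).trans hp.symm
  · simpa using PySem.List.sorted_pairwise_rev xs (fun x => x)
  · simpa using hs

-- taking the first three of a ≥-sorted list after an ordered insertion is one tracker step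
theorem take3_orderedInsert (x s0 s1 s2 : Int) (rest : List Int)
    (h0 : s1 ≤ s0) (h1 : s2 ≤ s1) :
    (List.orderedInsert (· ≥ ·) x (s0 :: s1 :: s2 :: rest)).take 3
      = [(step3 (s0, s1, s2) x).1, (step3 (s0, s1, s2) x).2.1, (step3 (s0, s1, s2) x).2.2] := by
  simp only [List.orderedInsert, step3]
  split_ifs with a1 a2 a3 a4 a5 a6 <;>
    simp_all [List.take, List.cons.injEq] <;> omega

-- loop invariant: the tracker triple is the first three of the zero-padded, reverse-sorted list
theorem tracker_invariant (l : List Int) :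
    (PySem.List.sorted (l ++ [0, 0, 0]) (fun x => x) true).take 3
      = [(l.foldl step3 (0, 0, 0)).1, (l.foldl step3 (0, 0, 0)).2.1, (l.foldl step3 (0, 0, 0)).2.2] := by
  induction l using List.reverseRecOn with
  | nil => decide
  | append_singleton l x ih =>
      have hsorted : PySem.List.sorted ((l ++ [x]) ++ [0, 0, 0]) (fun y => y) true
          = List.orderedInsert (· ≥ ·) x (PySem.List.sorted (l ++ [0, 0, 0]) (fun y => y) true) := by
        apply sRev_char
        · refine (List.perm_orderedInsert _ x _).trans ?_
          refine (List.Perm.cons x (PySem.List.sorted_perm _ _ _)).trans ?_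
          have : (l ++ [x]) ++ [0, 0, 0] = l ++ (x :: [0, 0, 0]) := by simp
          rw [this]
          exact (List.perm_middle).symm
        · exact List.Pairwise.orderedInsert x _ (PySem.List.sorted_pairwise_rev _ _)
      set S := PySem.List.sorted (l ++ [0, 0, 0]) (fun y => y) true with hS
      have hlen : 3 ≤ S.length := by
        rw [hS, PySem.List.length_sorted]; simp
      obtain ⟨s0, s1, s2, rest, hshape⟩ :
          ∃ s0 s1 s2 rest, S = s0 :: s1 :: s2 :: rest := by
        match S, hlen with
        | s0 :: s1 :: s2 :: rest, _ => exact ⟨s0, s1, s2, rest, rfl⟩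
      have hpw := PySem.List.sorted_pairwise_rev (l ++ [0, 0, 0]) (fun y => y)
      rw [← hS, hshape] at hpw
      have h0 : s1 ≤ s0 := (List.pairwise_cons.mp hpw).1 s1 (by simp)
      have h1 : s2 ≤ s1 :=
        (List.pairwise_cons.mp (List.pairwise_cons.mp hpw).2).1 s2 (by simp)
      have hih := ih
      rw [hshape] at hih
      simp only [List.take] at hih
      obtain ⟨e0, e1, e2⟩ : s0 = (l.foldl step3 (0, 0, 0)).1 ∧
          s1 = (l.foldl step3 (0, 0, 0)).2.1 ∧ s2 = (l.foldl step3 (0, 0, 0)).2.2 := by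
        simpa using hih
      rw [List.foldl_append, List.foldl_cons, List.foldl_nil, hsorted, hshape,
        take3_orderedInsert x s0 s1 s2 rest h0 h1, e0, e1, e2]

-- appending the zero padding to a list of positive counts reverse-sorts to the sorted list ++ padding
theorem sRev_append_pad (V : List Int) (hpos : ∀ v ∈ V, 1 ≤ v) :
    PySem.List.sorted (V ++ [0, 0, 0]) (fun x => x) true
      = PySem.List.sorted V (fun x => x) true ++ [0, 0, 0] := by
  apply sRev_char
  · exact (PySem.List.sorted_perm V (fun x => x) true).append_right _
  · rw [List.pairwise_append]
    refine ⟨PySem.List.sorted_pairwise_rev V (fun x => x), by decide, ?_⟩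
    intro a ha b hb
    have : a ∈ V := (PySem.List.mem_sorted V (fun x => x) true a).mp ha
    have := hpos a this
    have : b = 0 := by simpa using hb
    omega

-- every value of the counting dict built over p is a positive count
theorem counts_values_pos (p : List Int) :
    ∀ v ∈ (p.foldl (fun d v => d.insert v (d.getD v 0 + 1)) (PySem.Dict.empty : PySem.Dict Int Int)).values, 1 ≤ v := by
  rw [PySem.Dict.foldl_insert_getD_add_one_eq_counter]
  rw [PySem.Dict.values_eq_map_keys _ (PySem.Dict.nodup_keys_counter p) 0]
  intro v hv
  simp only [List.mem_map] at hv
  obtain ⟨k, hk, rfl⟩ := hv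
  rw [PySem.Dict.getD_counter]
  have hkp : k ∈ p := by
    rw [PySem.Dict.keys_counter] at hk
    exact (PySem.Set.mem_ofList p k).mp hk
  have := List.count_pos_iff.mpr hkp
  omega

-- ===== VERDICT (by name: the statement is the Claim_ definition above) =====
theorem maxPurchase_spec : Claim_equal_maxPurchase := by
  intro p _
  unfold Spec_maxPurchase maxPurchase maxPurchase_alt
  simp only [PySem.Dict.values]
  set V := ((p.foldl (fun d v => d.insert v (d.getD v 0 + 1)) (PySem.Dict.empty : PySem.Dict Int Int)).items.map
    (fun kv => kv.2)) with hV
  have hpos : ∀ v ∈ V, 1 ≤ v := counts_values_pos p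
  have hinv := tracker_invariant V
  rw [sRev_append_pad V hpos] at hinv
  set f := V.foldl step3 (0, 0, 0) with hf
  set s := PySem.List.sorted V (fun x => x) true with hs
  have hsum : (List.take 3 (s ++ [0, 0, 0])).sum = f.1 + f.2.1 + f.2.2 := by
    rw [hinv]; simp; ring
  by_cases hlen : s.length < 3
  · have hposS : ∀ v ∈ s, 1 ≤ v := by
      intro v hv
      exact hpos v ((PySem.List.mem_sorted V (fun x => x) true v).mp hv)
    rw [if_pos hlen, ← hsum]
    match s, hlen with
    | [], _ => decide
    | [a], _ => simp
    | [a, b], _ => simp [List.take]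
  · rw [if_neg hlen, ← hsum]
    congr 1
    rw [List.take_append_of_le_length (by omega)]
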